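-- pv_equiv track=rewrite | github.com/itsmeichigo/AdventOfCode2020 | AdventOfCode2021/Day09/day09.py | calculate_lava_tubes
-- ===== SOURCE A (Python) =====
-- from typing import List, Tuple
-- from math import prod
--
-- def find_adjacents(input) -> List[List[List[Tuple[int, int, int]]]]:
--     adjacents = [[[] for n in line] for line in input]
--     width, height = len(input[0]), len(input)
--     for x in range(height):
--         for y in range(width):
--             current = adjacents[x][y]
--             if x-1 >= 0: current.append((input[x-1][y], x-1, y))
--             if x+1 < height: current.append((input[x+1][y], x+1, y))
--             if y-1 >= 0: current.append((input[x][y-1], x, y-1))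
--             if y+1 < width: current.append((input[x][y+1], x, y+1))
--     return adjacents
--
-- def calculate_lava_tubes(input) -> Tuple[int, int]:
--     risk_level, basins = 0, []
--     in_basin = [[None for n in line] for line in input]
--     width, height = len(input[0]), len(input)
--     adjacents = find_adjacents(input)
--     for x in range(height):
--         for y in range(width):
--             if len([n for n in adjacents[x][y] if n[0] > input[x][y]]) == len(adjacents[x][y]):
--                 risk_level += (1 + input[x][y])
--             if in_basin[x][y] is None:
--                 if input[x][y] == 9: in_basin[x][y] = False
--                 else:
--                     in_basin[x][y] = True
--                     basin = []
--                     basin.append(input[x][y])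
--                     find_basin(x, y, adjacents, in_basin, basin)
--                     basins.append(basin)
--     sizes = [len(basin) for basin in basins]
--     sizes.sort(reverse=True)
--     three_largest_basins = prod(sizes[0:3])
--     return (risk_level, three_largest_basins)
--
-- def find_basin(x, y, adjacents, in_basin, basin):
--     for (value, i, j) in adjacents[x][y]:
--         if in_basin[i][j] is None:
--             if value == 9:
--                 in_basin[i][j] = False
--             else:
--                 in_basin[i][j] = True
--                 basin.append(value)
--                 find_basin(i, j, adjacents, in_basin, basin)
-- ===== SOURCE B (Python) =====
-- from math import prod
--
-- def calculate_lava_tubes(input):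
--     height, width = len(input), len(input[0])
--     risk_level = 0
--     sizes = []
--     seen = [[False] * width for _ in input]
--     for x in range(height):
--         for y in range(width):
--             v = input[x][y]
--             around = [(x - 1, y), (x + 1, y), (x, y - 1), (x, y + 1)]
--             if all(input[i][j] > v for i, j in around
--                    if 0 <= i < height and 0 <= j < width):
--                 risk_level += 1 + v
--             if not seen[x][y]:
--                 seen[x][y] = True
--                 if v != 9:
--                     size = 1
--                     stack = [iter(around)]
--                     while stack:
--                         nxt = next(stack[-1], None)
--                         if nxt is None:
--                             stack.pop()
--                             continue
--                         i, j = nxt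
--                         if 0 <= i < height and 0 <= j < width and not seen[i][j]:
--                             seen[i][j] = True
--                             if input[i][j] != 9:
--                                 size += 1
--                                 stack.append(iter([(i-1,j),(i+1,j),(i,j-1),(i,j+1)]))
--                     sizes.append(size)
--     sizes.sort(reverse=True)
--     return (risk_level, prod(sizes[0:3]))
-- ===== Notes on version B (the rewrite author's own statement) =====
-- stated objective: simpler
-- what changed: B drops A's whole-grid adjacency-table precompute and its recursive flood fill: neighbours are generated inline (bounds-checked at use), the low-point test is a single all() over in-bounds neighbours instead of comparing a filtered list's length, and each basin is measured by an explicit-stack iterative flood fill that counts cells instead of accumulating their values in lists.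
import Mathlib
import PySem

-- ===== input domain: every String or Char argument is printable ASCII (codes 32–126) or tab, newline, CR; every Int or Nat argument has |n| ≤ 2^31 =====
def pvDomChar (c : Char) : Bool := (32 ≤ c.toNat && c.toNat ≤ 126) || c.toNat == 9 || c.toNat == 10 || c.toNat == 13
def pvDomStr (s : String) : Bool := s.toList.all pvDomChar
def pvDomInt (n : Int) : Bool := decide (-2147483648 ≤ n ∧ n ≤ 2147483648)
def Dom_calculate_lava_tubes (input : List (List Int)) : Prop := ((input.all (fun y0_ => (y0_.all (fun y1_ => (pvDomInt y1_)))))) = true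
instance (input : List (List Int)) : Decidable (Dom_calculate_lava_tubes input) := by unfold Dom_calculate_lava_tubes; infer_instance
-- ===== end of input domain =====

-- B replaces A's adjacency-table precompute and recursive flood fill by inline neighbour
-- generation and an explicit-stack flood fill (objective: simpler; return value only, no mutation observable).

-- shared grid primitives: grid[x][y] read / write (all reachable accesses are in range under Pre_,
-- where they compute exactly Python's indexing; the defaults are never returned there)
def gget {α : Type} (g : List (List α)) (x y : Int) (d : α) : α :=
  if 0 ≤ x ∧ 0 ≤ y then ((g.getD x.toNat []).getD y.toNat d) else d

def gset {α : Type} (g : List (List α)) (x y : Int) (a : α) : List (List α) :=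
  if 0 ≤ x ∧ 0 ≤ y then g.modify x.toNat (fun r => r.set y.toNat a) else g

-- ===== PORT A =====

-- number of still-unvisited (None) cells: used only as recursion fuel for find_basin
-- (Python's recursion terminates because each call first marks a None cell; proven sufficient below)
def noneCnt (g : List (List (Option Bool))) : Nat :=
  (g.map (fun r => r.countP (fun o => o.isNone))).sum

def find_adjacents (input : List (List Int)) : List (List (List (Int × Int × Int))) :=
  let adjacents := input.map (fun line => line.map (fun _ => ([] : List (Int × Int × Int))))
  let width : Int := ((input.headD []).length : Int)   -- len(input[0]); input ≠ [] under Pre_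
  let height : Int := (input.length : Int)
  (PySem.List.pyRange 0 height 1).foldl (fun t x =>
    (PySem.List.pyRange 0 width 1).foldl (fun t y =>
      let cur := gget t x y []
      let cur := if x - 1 ≥ 0 then cur ++ [(gget input (x-1) y 0, x-1, y)] else cur
      let cur := if x + 1 < height then cur ++ [(gget input (x+1) y 0, x+1, y)] else cur
      let cur := if y - 1 ≥ 0 then cur ++ [(gget input x (y-1) 0, x, y-1)] else cur
      let cur := if y + 1 < width then cur ++ [(gget input x (y+1) 0, x, y+1)] else cur
      gset t x y cur) t) adjacents

-- the loop of find_basin over adjacents[x][y]; fuel-structural port of Python's recursion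
def findGo (adj : List (List (List (Int × Int × Int)))) :
    Nat → List (Int × Int × Int) → List (List (Option Bool)) → List Int →
    List (List (Option Bool)) × List Int
  | _, [], ib, basin => (ib, basin)
  | 0, _, ib, basin => (ib, basin)       -- fuel exhausted: unreachable, sufficient fuel is passed
  | f+1, (v, i, j) :: rest, ib, basin =>
    if gget ib i j (some false) = none then
      if v = 9 then findGo adj (f+1) rest (gset ib i j (some false)) basin
      else
        let r := findGo adj f (gget adj i j []) (gset ib i j (some true)) (basin ++ [v])
        findGo adj (f+1) rest r.1 r.2
    else findGo adj (f+1) rest ib basin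
  termination_by f ns _ _ => (f, ns.length)

def find_basin (x y : Int) (adj : List (List (List (Int × Int × Int))))
    (ib : List (List (Option Bool))) (basin : List Int) :
    List (List (Option Bool)) × List Int :=
  findGo adj (noneCnt ib + 1) (gget adj x y []) ib basin

-- body of the double loop of calculate_lava_tubes; state = (risk_level, basins, in_basin)
def lavaCellA (input : List (List Int)) (adj : List (List (List (Int × Int × Int))))
    (st : Int × List (List Int) × List (List (Option Bool))) (x y : Int) :
    Int × List (List Int) × List (List (Option Bool)) :=
  match st with
  | (risk, basins, ib) =>
    let a := gget adj x y []
    let v := gget input x y 0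
    let risk := if (a.filter (fun n => decide (n.1 > v))).length = a.length then risk + (1 + v) else risk
    if gget ib x y (some false) = none then
      if v = 9 then (risk, basins, gset ib x y (some false))
      else
        let ib1 := gset ib x y (some true)
        let r := find_basin x y adj ib1 [v]
        (risk, basins ++ [r.2], r.1)
    else (risk, basins, ib)

def calculate_lava_tubes (input : List (List Int)) : Int × Int :=
  let ib0 : List (List (Option Bool)) := input.map (fun line => line.map (fun _ => none))
  let width : Int := ((input.headD []).length : Int)   -- len(input[0]); input ≠ [] under Pre_
  let height : Int := (input.length : Int)
  let adj := find_adjacents input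
  let st := (PySem.List.pyRange 0 height 1).foldl (fun st x =>
      (PySem.List.pyRange 0 width 1).foldl (fun st y => lavaCellA input adj st x y) st)
    ((0 : Int), ([] : List (List Int)), ib0)
  let sizes : List Int := st.2.1.map (fun b => (b.length : Int))
  let sizes := PySem.List.sorted sizes (fun s => s) true
  (st.1, (PySem.List.slice sizes (some 0) (some 3)).foldl (fun a b => a * b) 1)

-- ===== PORT B =====

def inb (h w i j : Int) : Bool := decide (0 ≤ i ∧ i < h ∧ 0 ≤ j ∧ j < w)

-- number of still-unseen cells: used only as loop fuel for the flood-fill stack loop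
-- (the loop terminates because every push first marks an unseen cell; proven sufficient below)
def unseenCnt (g : List (List Bool)) : Nat :=
  (g.map (fun r => r.countP (fun b => !b))).sum

-- the explicit-stack flood fill: stack of iterators over neighbour coordinates
def runB (input : List (List Int)) (h w : Int) :
    Nat → List (List Bool) → Int → List (List (Int × Int)) → List (List Bool) × Int
  | _, seen, size, [] => (seen, size)
  | 0, seen, size, _ => (seen, size)     -- fuel exhausted: unreachable, sufficient fuel is passed
  | f+1, seen, size, [] :: k => runB input h w (f+1) seen size k
  | f+1, seen, size, ((i, j) :: rest) :: k =>
    if inb h w i j && !(gget seen i j false) then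
      let seen := gset seen i j true
      if gget input i j 0 = 9 then runB input h w (f+1) seen size (rest :: k)
      else runB input h w f seen (size + 1)
             ([(i-1, j), (i+1, j), (i, j-1), (i, j+1)] :: rest :: k)
    else runB input h w (f+1) seen size (rest :: k)
  termination_by f _ _ stack => (f, (stack.map List.length).sum + stack.length)
  decreasing_by all_goals simp_all; omega

-- body of B's double loop; state = (risk_level, sizes, seen)
def lavaCellB (input : List (List Int)) (h w : Int)
    (st : Int × List Int × List (List Bool)) (x y : Int) : Int × List Int × List (List Bool) :=
  match st with
  | (risk, sizes, seen) =>
    let v := gget input x y 0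
    let around := [(x-1, y), (x+1, y), (x, y-1), (x, y+1)]
    let risk := if (around.filter (fun p => inb h w p.1 p.2)).all
                     (fun p => decide (gget input p.1 p.2 0 > v)) then risk + (1 + v) else risk
    if gget seen x y false then (risk, sizes, seen)
    else
      let seen := gset seen x y true
      if v = 9 then (risk, sizes, seen)
      else
        let r := runB input h w (unseenCnt seen + 1) seen 1 [around]
        (risk, sizes ++ [r.2], r.1)

def calculate_lava_tubes_alt (input : List (List Int)) : Int × Int :=
  let height : Int := (input.length : Int)
  let width : Int := ((input.headD []).length : Int)   -- len(input[0]); input ≠ [] under Pre_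
  let seen0 : List (List Bool) := input.map (fun _ => List.replicate width.toNat false)
  let st := (PySem.List.pyRange 0 height 1).foldl (fun st x =>
      (PySem.List.pyRange 0 width 1).foldl (fun st y => lavaCellB input height width st x y) st)
    ((0 : Int), ([] : List Int), seen0)
  let sizes := PySem.List.sorted st.2.1 (fun s => s) true
  (st.1, (PySem.List.slice sizes (some 0) (some 3)).foldl (fun a b => a * b) 1)

-- ===== PRECONDITION & SPEC =====
-- Pre_: exactly the inputs where A (and B) return: a nonempty grid whose every row has at least
-- len(input[0]) entries; otherwise Python raises IndexError (input[0] or input[x][y]).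
def Pre_calculate_lava_tubes (input : List (List Int)) : Prop :=
  input ≠ [] ∧ ∀ r ∈ input, (input.headD []).length ≤ r.length
instance (input : List (List Int)) : Decidable (Pre_calculate_lava_tubes input) := by
  unfold Pre_calculate_lava_tubes; infer_instance

def pvWitness_calculate_lava_tubes : List (List Int) := [[2, 9], [9, 1]]

def Spec_calculate_lava_tubes (input : List (List Int)) (out : Int × Int) : Prop :=
  out = calculate_lava_tubes_alt input
instance (input : List (List Int)) (out : Int × Int) : Decidable (Spec_calculate_lava_tubes input out) := by
  unfold Spec_calculate_lava_tubes; infer_instance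

-- ===== CLAIM (what is proved, stated in full; the proofs are below) =====
def Claim_equal_calculate_lava_tubes : Prop :=
  ∀ (input : List (List Int)), Dom_calculate_lava_tubes input →
    Pre_calculate_lava_tubes input →
    Spec_calculate_lava_tubes input (calculate_lava_tubes input)

-- ===== LEMMAS AND PROOFS =====

-- Nat-index views of gget / gset
theorem gget_eq {α : Type} (g : List (List α)) (x y : Int) (d : α) (hx : 0 ≤ x) (hy : 0 ≤ y) :
    gget g x y d = (g.getD x.toNat []).getD y.toNat d := by
  simp [gget, hx, hy]

theorem gset_eq {α : Type} (g : List (List α)) (x y : Int) (a : α) (hx : 0 ≤ x) (hy : 0 ≤ y) :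
    gset g x y a = g.modify x.toNat (fun r => r.set y.toNat a) := by
  simp [gset, hx, hy]


-- row/grid indexing facts
theorem getD_set_self {α : Type} (r : List α) (q : Nat) (a d : α) (hq : q < r.length) :
    (r.set q a).getD q d = a := by
  simp [List.getD_eq_getElem?_getD, List.getElem?_set_self (by omega)]

theorem getD_set_ne {α : Type} (r : List α) (q q' : Nat) (a d : α) (h : q ≠ q') :
    (r.set q a).getD q' d = r.getD q' d := by
  simp [List.getD_eq_getElem?_getD, List.getElem?_set_ne h]

theorem aget_aset_self {α : Type} (g : List (List α)) (p q : Nat) (a d : α)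
    (hp : p < g.length) (hq : q < (g.getD p []).length) :
    (((g.modify p (fun r => r.set q a)).getD p []).getD q d) = a := by
  have h1 : (g.modify p (fun r => r.set q a)).getD p [] = (g.getD p []).set q a := by
    simp [List.getD_eq_getElem?_getD, List.getElem?_modify]
    cases h : g[p]? with
    | none => simp
    | some r => simp
  rw [h1, getD_set_self _ _ _ _ hq]

theorem aget_aset_ne {α : Type} (g : List (List α)) (p q p' q' : Nat) (a d : α)
    (h : p ≠ p' ∨ q ≠ q') :
    (((g.modify p (fun r => r.set q a)).getD p' []).getD q' d) = ((g.getD p' []).getD q' d) := by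
  by_cases hp : p = p'
  · subst hp
    rcases h with h | h
    · exact absurd rfl h
    · have h1 : (g.modify p (fun r => r.set q a)).getD p [] = (g.getD p []).set q a := by
        simp [List.getD_eq_getElem?_getD, List.getElem?_modify]
        cases hg : g[p]? with
        | none => simp
        | some r => simp
      rw [h1, getD_set_ne _ _ _ _ _ h]
  · have h1 : (g.modify p (fun r => r.set q a)).getD p' [] = g.getD p' [] := by
      simp [List.getD_eq_getElem?_getD, List.getElem?_modify, hp]
    rw [h1]

def dims {α : Type} (g : List (List α)) : List Nat := g.map List.length

theorem dims_aset {α : Type} (g : List (List α)) (p q : Nat) (a : α) :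
    dims (g.modify p (fun r => r.set q a)) = dims g := by
  induction g generalizing p with
  | nil => simp
  | cons r t ih =>
    cases p with
    | zero => simp [dims]
    | succ p => simpa [dims] using ih p

-- counting facts for the two fuel measures
theorem countP_set_decr (r : List (Option Bool)) (q : Nat) (a : Bool)
    (hq : q < r.length) (he : r.getD q (some false) = none) :
    (r.set q (some a)).countP (fun o => o.isNone) + 1 = r.countP (fun o => o.isNone) := by
  induction r generalizing q with
  | nil => simp at hq
  | cons x t ih =>
    cases q with
    | zero =>
      simp [List.getD] at he
      subst he
      simp [List.countP_cons]
    | succ q =>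
      simp at hq
      simp [List.getD] at he
      simp [List.countP_cons]
      have := ih q hq (by simpa [List.getD] using he)
      omega

theorem noneCnt_aset (g : List (List (Option Bool))) (p q : Nat) (a : Bool)
    (hp : p < g.length) (hq : q < (g.getD p []).length)
    (he : (g.getD p []).getD q (some false) = none) :
    noneCnt (g.modify p (fun r => r.set q (some a))) + 1 = noneCnt g := by
  induction g generalizing p with
  | nil => simp at hp
  | cons r t ih =>
    cases p with
    | zero =>
      simp [List.getD] at hq he
      simp [noneCnt]
      have := countP_set_decr r q a hq he
      omega
    | succ p =>
      simp at hp
      simp [List.getD] at hq he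
      simp [noneCnt]
      have := ih p hp (by simpa [List.getD] using hq) (by simpa [List.getD] using he)
      simp [noneCnt] at this
      omega

theorem countP_set_decrB (r : List Bool) (q : Nat)
    (hq : q < r.length) (he : r.getD q false = false) :
    (r.set q true).countP (fun b => !b) + 1 = r.countP (fun b => !b) := by
  induction r generalizing q with
  | nil => simp at hq
  | cons x t ih =>
    cases q with
    | zero =>
      simp [List.getD] at he
      subst he
      simp [List.countP_cons]
    | succ q =>
      simp at hq
      simp [List.getD] at he
      simp [List.countP_cons]
      have := ih q hq (by simpa [List.getD] using he)
      omega

theorem unseenCnt_aset (g : List (List Bool)) (p q : Nat)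
    (hp : p < g.length) (hq : q < (g.getD p []).length)
    (he : (g.getD p []).getD q false = false) :
    unseenCnt (g.modify p (fun r => r.set q true)) + 1 = unseenCnt g := by
  induction g generalizing p with
  | nil => simp at hp
  | cons r t ih =>
    cases p with
    | zero =>
      simp [List.getD] at hq he
      simp [unseenCnt]
      have := countP_set_decrB r q hq he
      omega
    | succ p =>
      simp at hp
      simp [List.getD] at hq he
      simp [unseenCnt]
      have := ih p hp (by simpa [List.getD] using hq) (by simpa [List.getD] using he)
      simp [unseenCnt] at this
      omega

-- a None read through gget with default (some false) pins the indices in range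
theorem gget_none_range (g : List (List (Option Bool))) (i j : Int)
    (h : gget g i j (some false) = none) :
    0 ≤ i ∧ 0 ≤ j ∧ i.toNat < g.length ∧ j.toNat < (g.getD i.toNat []).length := by
  by_cases hij : 0 ≤ i ∧ 0 ≤ j
  · refine ⟨hij.1, hij.2, ?_, ?_⟩
    · by_contra hp
      push_neg at hp
      rw [gget] at h
      simp [hij, List.getD_eq_getElem?_getD] at h
      rw [List.getElem?_eq_none (l := g) (by omega)] at h
      simp at h
    · by_contra hq
      push_neg at hq
      rw [gget] at h
      simp [hij, List.getD_eq_getElem?_getD] at h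
      rw [show (g[i.toNat]?.getD [])[j.toNat]? = none from
        List.getElem?_eq_none (by simpa [List.getD_eq_getElem?_getD] using hq)] at h
      simp at h
  · rw [gget] at h
    simp [hij] at h

theorem dims_gset {α : Type} (g : List (List α)) (x y : Int) (a : α) :
    dims (gset g x y a) = dims g := by
  unfold gset; split
  · exact dims_aset g x.toNat y.toNat a
  · rfl

theorem noneCnt_gset_none (g : List (List (Option Bool))) (i j : Int) (a : Bool)
    (h : gget g i j (some false) = none) :
    noneCnt (gset g i j (some a)) + 1 = noneCnt g := by
  obtain ⟨hi0, hj0, hp, hq⟩ := gget_none_range g i j h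
  rw [gset_eq _ _ _ _ hi0 hj0]
  exact noneCnt_aset g i.toNat j.toNat a hp hq (by rw [gget_eq _ _ _ _ hi0 hj0] at h; exact h)

-- the abstraction from A's Option-valued visited grid to B's Bool-valued one
def absS (w : Nat) (g : List (List (Option Bool))) : List (List Bool) :=
  g.map (fun r => (r.take w).map Option.isSome)

theorem absS_aset (w : Nat) (g : List (List (Option Bool))) (p q : Nat) (c : Bool)
    (hq : q < w) :
    absS w (g.modify p (fun r => r.set q (some c)))
      = (absS w g).modify p (fun r => r.set q true) := by
  induction g generalizing p with
  | nil => simp [absS]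
  | cons r t ih =>
    cases p with
    | zero => simp [absS, List.take_set, List.map_set]
    | succ p =>
      simp only [List.modify_succ_cons, absS, List.map_cons]
      congr 1
      simpa [absS] using ih p

theorem absS_get (w : Nat) (g : List (List (Option Bool))) (p q : Nat)
    (hq : q < w) (hql : w ≤ (g.getD p []).length) :
    ((absS w g).getD p []).getD q false = ((g.getD p []).getD q (some false)).isSome := by
  have hrow : (absS w g).getD p [] = ((g.getD p []).take w).map Option.isSome := by
    rw [absS, List.getD_eq_getElem?_getD, List.getD_eq_getElem?_getD, List.getElem?_map]
    cases hg : g[p]? with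
    | none => simp
    | some r => simp
  rw [hrow]
  have hq' : q < (g.getD p []).length := by omega
  rw [List.getD_eq_getElem?_getD, List.getElem?_map, List.getElem?_take_of_lt hq]
  cases hE : (g.getD p [])[q]? with
  | none => exact absurd (List.getElem?_eq_none_iff.mp hE) (by omega)
  | some e =>
    rw [List.getD_eq_getElem?_getD] at hE
    simp [List.getD_eq_getElem?_getD, hE]

theorem dims_absS (w : Nat) (g : List (List (Option Bool))) (p : Nat) (hp : p < g.length)
    (hql : w ≤ (g.getD p []).length) :
    ((absS w g).getD p []).length = w := by
  have hrow : (absS w g).getD p [] = ((g.getD p []).take w).map Option.isSome := by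
    rw [absS, List.getD_eq_getElem?_getD, List.getD_eq_getElem?_getD, List.getElem?_map]
    cases hg : g[p]? with
    | none => simp
    | some r => simp
  rw [hrow]
  simp only [List.length_map, List.length_take]
  omega

-- structural facts about A's flood fill
theorem findGo_props (adj : List (List (List (Int × Int × Int)))) (f : Nat)
    (ns : List (Int × Int × Int)) (ib : List (List (Option Bool))) (b : List Int) :
    (∃ d, (findGo adj f ns ib b).2 = b ++ d) ∧
    noneCnt (findGo adj f ns ib b).1 + ((findGo adj f ns ib b).2.length - b.length) ≤ noneCnt ib ∧
    dims (findGo adj f ns ib b).1 = dims ib := by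
  fun_induction findGo adj f ns ib b with
  | case1 ib b => exact ⟨⟨[], by simp⟩, by simp, rfl⟩
  | case2 ns ib b => exact ⟨⟨[], by simp⟩, by simp, rfl⟩
  | case3 f i j rest ib b hnone ih =>
    obtain ⟨⟨d, hd⟩, h2, h3⟩ := ih
    have hset := noneCnt_gset_none ib i j false hnone
    exact ⟨⟨d, hd⟩, by omega, by rw [h3, dims_gset]⟩
  | case4 f v i j rest ib b hnone h9 r ih2 ih1 =>
    simp only [r] at ih1 ⊢
    obtain ⟨⟨d1, hd1⟩, h12, h13⟩ := ih2
    obtain ⟨⟨d2, hd2⟩, h22, h23⟩ := ih1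
    have hset := noneCnt_gset_none ib i j true hnone
    rw [dims_gset] at h13
    set F1 := findGo adj f (gget adj i j []) (gset ib i j (some true)) (b ++ [v]) with hF1
    set F2 := findGo adj (f + 1) rest F1.1 F1.2 with hF2
    have e1 : (b ++ [v]).length = b.length + 1 := by simp
    have e2 : F1.2.length = b.length + 1 + d1.length := by rw [hd1]; simp; omega
    have e3 : F2.2.length = b.length + 1 + d1.length + d2.length := by
      rw [hd2]; simp only [List.length_append, e2]
    refine ⟨⟨[v] ++ d1 ++ d2, by rw [hd2, hd1]; simp⟩, by omega, by rw [h23, h13]⟩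
  | case5 f v i j rest ib b hnone ih =>
    obtain ⟨⟨d, hd⟩, h2, h3⟩ := ih
    exact ⟨⟨d, hd⟩, by omega, h3⟩

-- the inline neighbour list with values, as A's adjacency table stores it
def entA (input : List (List Int)) (W : Nat) (x y : Int) : List (Int × Int × Int) :=
  (if x - 1 ≥ 0 then [(gget input (x-1) y 0, x-1, y)] else []) ++
  (if x + 1 < (input.length : Int) then [(gget input (x+1) y 0, x+1, y)] else []) ++
  (if y - 1 ≥ 0 then [(gget input x (y-1) 0, x, y-1)] else []) ++
  (if y + 1 < (W : Int) then [(gget input x (y+1) 0, x, y+1)] else [])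

-- Int-level read/write lemmas
theorem gget_gset_same (g : List (List α)) (x y : Int) (a d : α)
    (hx : 0 ≤ x) (hy : 0 ≤ y) (hp : x.toNat < g.length)
    (hq : y.toNat < (g.getD x.toNat []).length) :
    gget (gset g x y a) x y d = a := by
  rw [gset_eq _ _ _ _ hx hy, gget_eq _ _ _ _ hx hy]
  exact aget_aset_self g x.toNat y.toNat a d hp hq

theorem gget_gset_ne (g : List (List α)) (x y x' y' : Int) (a d : α)
    (hx : 0 ≤ x) (hy : 0 ≤ y) (hne : ¬(x = x' ∧ y = y')) :
    gget (gset g x y a) x' y' d = gget g x' y' d := by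
  by_cases hxy : 0 ≤ x' ∧ 0 ≤ y'
  · rw [gset_eq _ _ _ _ hx hy, gget_eq _ _ _ _ hxy.1 hxy.2, gget_eq _ _ _ _ hxy.1 hxy.2]
    apply aget_aset_ne
    by_cases hxx : x = x'
    · right; intro hq; apply hne; subst hxx; exact ⟨rfl, by omega⟩
    · left; intro hq; exact hxx (by omega)
  · rw [gget, gget, if_neg hxy, if_neg hxy]

theorem rowlen_of_dims {α β : Type} (t : List (List α)) (u : List (List β))
    (h : dims t = dims u) (p : Nat) : (t.getD p []).length = (u.getD p []).length := by
  have hl : t.length = u.length := by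
    have := congrArg List.length h; simpa [dims] using this
  by_cases hp : p < t.length
  · have h1 : (t.map List.length)[p]? = (u.map List.length)[p]? := by rw [show t.map List.length = dims t from rfl, h]; rfl
    rw [List.getElem?_map, List.getElem?_map] at h1
    rw [List.getD_eq_getElem?_getD, List.getD_eq_getElem?_getD,
      List.getElem?_eq_getElem hp, List.getElem?_eq_getElem (by omega : p < u.length)] at *
    simpa using h1
  · rw [List.getD_eq_getElem?_getD, List.getD_eq_getElem?_getD,
      List.getElem?_eq_none (by omega), List.getElem?_eq_none (by omega)]
    simp

theorem dims_foldOne {α : Type} (f : List (List α) → Int → Int → α) (x : Int)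
    (ys : List Int) (t : List (List α)) :
    dims (ys.foldl (fun t y => gset t x y (f t x y)) t) = dims t := by
  induction ys generalizing t with
  | nil => rfl
  | cons y ys ih => rw [List.foldl_cons, ih, dims_gset]

-- the initial all-[] table reads [] everywhere
theorem adj0_get (input : List (List Int)) (p q : Int) :
    gget (input.map (fun line => line.map (fun _ => ([] : List (Int × Int × Int))))) p q [] = [] := by
  unfold gget
  split
  · have hrow : (input.map (fun line => line.map (fun _ => ([] : List (Int × Int × Int))))).getD p.toNat []
        = (input.getD p.toNat []).map (fun _ => []) := by
      rw [List.getD_eq_getElem?_getD, List.getD_eq_getElem?_getD, List.getElem?_map]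
      cases input[p.toNat]? <;> simp
    rw [hrow, List.getD_eq_getElem?_getD, List.getElem?_map]
    cases (input.getD p.toNat [])[q.toNat]? <;> simp
  · rfl

-- effect of processing one row of find_adjacents' double loop
theorem tblRow (input : List (List Int)) (W : Nat)
    (hPre : ∀ p, p < input.length → W ≤ (input.getD p []).length) (x : Int)
    (hx0 : 0 ≤ x) (hxh : x < (input.length : Int)) :
    ∀ (ys : List Int) (t : List (List (List (Int × Int × Int)))), ys.Nodup →
    (∀ q ∈ ys, 0 ≤ q ∧ q < (W : Int)) → dims t = dims input →
    ∀ p q : Int,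
      gget (ys.foldl (fun t y => gset t x y (gget t x y [] ++ entA input W x y)) t) p q []
        = if p = x ∧ q ∈ ys then gget t p q [] ++ entA input W p q else gget t p q [] := by
  intro ys
  induction ys with
  | nil => intro t _ _ _ p q; simp
  | cons y ys ih =>
    intro t hnd hrange hdims p q
    have hy := hrange y (by simp)
    have hrow : y.toNat < (t.getD x.toNat []).length := by
      rw [rowlen_of_dims t input hdims]
      have := hPre x.toNat (by omega)
      omega
    have hxlen : x.toNat < t.length := by
      have hl : t.length = input.length := by
        have := congrArg List.length hdims; simpa [dims] using this
      omega
    rw [List.foldl_cons, ih (gset t x y (gget t x y [] ++ entA input W x y)) hnd.of_cons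
      (fun q hq => hrange q (by simp [hq])) (by rw [dims_gset]; exact hdims) p q]
    by_cases hpq : p = x ∧ q = y
    · obtain ⟨hp, hq⟩ := hpq
      subst hp; subst hq
      have hnotin : ¬(p = p ∧ q ∈ ys) := by
        intro hc; exact (List.nodup_cons.mp hnd).1 hc.2
      rw [if_neg hnotin, if_pos ⟨rfl, by simp⟩]
      exact gget_gset_same t p q _ [] hx0 hy.1 hxlen hrow
    · have hne := gget_gset_ne t x y p q (gget t x y [] ++ entA input W x y) [] hx0 hy.1
        (by intro hc; exact hpq ⟨hc.1.symm, hc.2.symm⟩)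
      by_cases hin : p = x ∧ q ∈ ys
      · rw [if_pos hin, if_pos ⟨hin.1, by simp [hin.2]⟩, hne]
      · rw [if_neg hin, if_neg (by
          intro hc
          rcases List.mem_cons.mp hc.2 with h1 | h1
          · exact hpq ⟨hc.1, h1⟩
          · exact hin ⟨hc.1, h1⟩), hne]

-- effect of the whole double loop
theorem tblOuter (input : List (List Int)) (W : Nat)
    (hPre : ∀ p, p < input.length → W ≤ (input.getD p []).length) :
    ∀ (xs : List Int) (t : List (List (List (Int × Int × Int)))), xs.Nodup →
    (∀ x ∈ xs, 0 ≤ x ∧ x < (input.length : Int)) → dims t = dims input →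
    ∀ p q : Int,
      gget (xs.foldl (fun t x => (PySem.List.pyRange 0 (W : Int) 1).foldl
        (fun t y => gset t x y (gget t x y [] ++ entA input W x y)) t) t) p q []
        = if p ∈ xs ∧ 0 ≤ q ∧ q < (W : Int) then gget t p q [] ++ entA input W p q
          else gget t p q [] := by
  intro xs
  induction xs with
  | nil => intro t _ _ _ p q; simp
  | cons x xs ih =>
    intro t hnd hrange hdims p q
    have hx := hrange x (by simp)
    rw [List.foldl_cons, ih _ hnd.of_cons (fun x hx => hrange x (by simp [hx]))
      (by rw [dims_foldOne (fun t x y => gget t x y [] ++ entA input W x y)]; exact hdims) p q]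
    rw [tblRow input W hPre x hx.1 hx.2 (PySem.List.pyRange 0 (W : Int) 1) t
      (PySem.List.nodup_pyRange_one 0 (W : Int))
      (fun q hq => by have := PySem.List.mem_pyRange_one.mp hq; omega) hdims p q]
    by_cases hpx : p = x ∧ q ∈ PySem.List.pyRange 0 (W : Int) 1
    · have hq' := PySem.List.mem_pyRange_one.mp hpx.2
      have hnin : ¬(p ∈ xs ∧ 0 ≤ q ∧ q < (W : Int)) := by
        intro hc
        exact (List.nodup_cons.mp hnd).1 (hpx.1 ▸ hc.1)
      rw [if_pos hpx, if_neg hnin, if_pos ⟨by simp [hpx.1], by omega⟩]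
    · rw [if_neg hpx]
      by_cases hin : p ∈ xs ∧ 0 ≤ q ∧ q < (W : Int)
      · rw [if_pos hin, if_pos ⟨by simp [hin.1], hin.2⟩]
      · rw [if_neg hin, if_neg (by
          intro hc
          rcases List.mem_cons.mp hc.1 with h1 | h1
          · exact hpx ⟨h1, PySem.List.mem_pyRange_one.mpr (by omega)⟩
          · exact hin ⟨h1, hc.2⟩)]

-- characterisation of A's adjacency table
theorem tbl (input : List (List Int)) (W : Nat) (hW : W = (input.headD []).length)
    (hPre : ∀ p, p < input.length → W ≤ (input.getD p []).length) (x y : Int)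
    (hx0 : 0 ≤ x) (hxh : x < (input.length : Int)) (hy0 : 0 ≤ y) (hyw : y < (W : Int)) :
    gget (find_adjacents input) x y [] = entA input W x y := by
  subst hW
  set W := (input.headD []).length with hW
  have hfa : find_adjacents input
      = (PySem.List.pyRange 0 (input.length : Int) 1).foldl
          (fun t x => (PySem.List.pyRange 0 (W : Int) 1).foldl
            (fun t y => gset t x y (gget t x y [] ++ entA input W x y)) t)
          (input.map (fun line => line.map (fun _ => []))) := by
    unfold find_adjacents
    simp only []
    congr 1
    funext t x
    congr 1
    funext t' y'
    simp only [entA]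
    split_ifs <;> simp
  rw [hfa]
  have hdims0 : dims (input.map (fun line => line.map
      (fun _ => ([] : List (Int × Int × Int))))) = dims input := by
    simp [dims, List.map_map, Function.comp_def]
  rw [tblOuter input W hPre (PySem.List.pyRange 0 (input.length : Int) 1) _
    (PySem.List.nodup_pyRange_one 0 (input.length : Int))
    (fun x hx => by have := PySem.List.mem_pyRange_one.mp hx; omega) hdims0 x y]
  rw [if_pos ⟨PySem.List.mem_pyRange_one.mpr (by omega), by omega, hyw⟩, adj0_get]
  simp

-- relation between A's pending-neighbour lists and B's (B re-checks bounds at pop time)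
inductive RnsRel (input : List (List Int)) (h w : Int) :
    List (Int × Int × Int) → List (Int × Int) → Prop
  | nil : RnsRel input h w [] []
  | skip {i j : Int} {ns ms} : ¬(0 ≤ i ∧ i < h ∧ 0 ≤ j ∧ j < w) →
      RnsRel input h w ns ms → RnsRel input h w ns ((i, j) :: ms)
  | cons {i j : Int} {ns ms} : (0 ≤ i ∧ i < h ∧ 0 ≤ j ∧ j < w) →
      RnsRel input h w ns ms →
      RnsRel input h w ((gget input i j 0, i, j) :: ns) ((i, j) :: ms)

theorem rns_frame (input : List (List Int)) (W : Nat) (x y : Int)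
    (hx0 : 0 ≤ x) (hxh : x < (input.length : Int)) (hy0 : 0 ≤ y) (hyw : y < (W : Int)) :
    RnsRel input (input.length : Int) (W : Int) (entA input W x y)
      [(x-1, y), (x+1, y), (x, y-1), (x, y+1)] := by
  simp only [entA]
  split_ifs <;>
    simp only [List.nil_append, List.append_nil, List.cons_append, List.singleton_append,
      List.append_assoc] <;>
    (repeat (first
      | exact RnsRel.nil
      | refine RnsRel.cons (by omega) ?_
      | refine RnsRel.skip (by omega) ?_))

theorem gset_absS (W : Nat) (g : List (List (Option Bool))) (i j : Int) (c : Bool)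
    (h0i : 0 ≤ i) (h0j : 0 ≤ j) (hjW : j.toNat < W) :
    absS W (gset g i j (some c)) = gset (absS W g) i j true := by
  rw [gset_eq _ _ _ _ h0i h0j, gset_eq _ _ _ _ h0i h0j]
  exact absS_aset W g i.toNat j.toNat c hjW

theorem gget_absS (W : Nat) (g : List (List (Option Bool))) (i j : Int)
    (h0i : 0 ≤ i) (h0j : 0 ≤ j) (hjW : j.toNat < W)
    (hql : W ≤ (g.getD i.toNat []).length) :
    gget (absS W g) i j false = (gget g i j (some false)).isSome := by
  rw [gget_eq _ _ _ _ h0i h0j, gget_eq _ _ _ _ h0i h0j]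
  exact absS_get W g i.toNat j.toNat hjW hql

theorem unseen_gset (g : List (List Bool)) (i j : Int)
    (h0i : 0 ≤ i) (h0j : 0 ≤ j) (hp : i.toNat < g.length)
    (hq : j.toNat < (g.getD i.toNat []).length)
    (he : gget g i j false = false) :
    unseenCnt (gset g i j true) + 1 = unseenCnt g := by
  rw [gset_eq _ _ _ _ h0i h0j]
  exact unseenCnt_aset g i.toNat j.toNat hp hq (by rw [gget_eq _ _ _ _ h0i h0j] at he; exact he)

theorem length_absS (W : Nat) (g : List (List (Option Bool))) :
    (absS W g).length = g.length := by simp [absS]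

theorem length_of_dims {α β : Type} (t : List (List α)) (u : List (List β))
    (h : dims t = dims u) : t.length = u.length := by
  have := congrArg List.length h; simpa [dims] using this

-- the simulation: A's recursive flood fill and B's stack loop compute related states
theorem simL (input : List (List Int)) (adj : List (List (List (Int × Int × Int)))) (W : Nat)
    (hPre : ∀ p, p < input.length → W ≤ (input.getD p []).length)
    (hadj : ∀ i j : Int, 0 ≤ i → i < (input.length : Int) → 0 ≤ j → j < (W : Int) →
      gget adj i j [] = entA input W i j) :
    ∀ (fA : Nat) (ns : List (Int × Int × Int)) (ms : List (Int × Int)),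
    RnsRel input (input.length : Int) (W : Int) ns ms →
    ∀ (ib : List (List (Option Bool))) (b : List Int) (size : Int)
      (K : List (List (Int × Int))) (fB : Nat),
    noneCnt ib < fA → unseenCnt (absS W ib) < fB → dims ib = dims input →
    runB input (input.length : Int) (W : Int) fB (absS W ib) size (ms :: K)
      = runB input (input.length : Int) (W : Int)
          (fB - ((findGo adj fA ns ib b).2.length - b.length))
          (absS W (findGo adj fA ns ib b).1)
          (size + (((findGo adj fA ns ib b).2.length - b.length : Nat) : Int)) K
    ∧ unseenCnt (absS W (findGo adj fA ns ib b).1)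
        + ((findGo adj fA ns ib b).2.length - b.length) ≤ unseenCnt (absS W ib) := by
  intro fA
  induction fA using Nat.strong_induction_on with
  | _ fA IH =>
  intro ns ms hR
  induction hR with
  | nil =>
    intro ib b size K fB hfa hfb hdims
    have hA : findGo adj fA [] ib b = (ib, b) := by cases fA <;> simp [findGo]
    rw [hA]
    cases fB with
    | zero => omega
    | succ fb =>
      refine ⟨?_, by simp⟩
      simp only [runB]
      simp
  | skip hOOR hR' ihm =>
    rename_i i j ns' ms'
    intro ib b size K fB hfa hfb hdims
    cases fB with
    | zero => omega
    | succ fb =>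
      have hc : (inb (input.length : Int) (W : Int) i j && !(gget (absS W ib) i j false)) = false := by
        rw [inb, decide_eq_false hOOR]
        rfl
      obtain ⟨ih1, ih2⟩ := ihm ib b size K (fb+1) hfa hfb hdims
      refine ⟨?_, ih2⟩
      simp only [runB, hc]
      simp only [Bool.false_eq_true, if_false]
      exact ih1
  | cons hinb hR' ihm =>
    rename_i i j ns' ms'
    intro ib b size K fB hfa hfb hdims
    cases fA with
    | zero => omega
    | succ fa =>
    cases fB with
    | zero => omega
    | succ fb =>
    -- ranges
    have hlen : ib.length = input.length := length_of_dims ib input hdims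
    have hp : i.toNat < ib.length := by omega
    have hrowW : W ≤ (ib.getD i.toNat []).length := by
      rw [rowlen_of_dims ib input hdims]
      exact hPre i.toNat (by omega)
    have hq : j.toNat < (ib.getD i.toNat []).length := by omega
    have hcT : inb (input.length : Int) (W : Int) i j = true := by
      rw [inb]; exact decide_eq_true hinb
    by_cases hee : gget ib i j (some false) = none
    · -- unvisited cell: B marks it
      have hbval : gget (absS W ib) i j false = false := by
        rw [gget_absS W ib i j (by omega) (by omega) (by omega) hrowW, hee]
        rfl
      have hmark : absS W (gset ib i j (some true)) = gset (absS W ib) i j true :=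
        gset_absS W ib i j true (by omega) (by omega) (by omega)
      have hmarkF : absS W (gset ib i j (some false)) = gset (absS W ib) i j true :=
        gset_absS W ib i j false (by omega) (by omega) (by omega)
      have hunseen : unseenCnt (gset (absS W ib) i j true) + 1 = unseenCnt (absS W ib) := by
        refine unseen_gset (absS W ib) i j (by omega) (by omega) ?_ ?_ hbval
        · rw [length_absS]; exact hp
        · rw [dims_absS W ib i.toNat hp hrowW]; omega
      have hcond : (inb (input.length : Int) (W : Int) i j && !(gget (absS W ib) i j false)) = true := by
        rw [hcT, hbval]; rfl
      by_cases h9 : gget input i j 0 = 9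
      · -- a 9-cell: both mark it and move on
        have hnone9 : noneCnt (gset ib i j (some false)) + 1 = noneCnt ib :=
          noneCnt_gset_none ib i j false hee
        have hA : findGo adj (fa+1) ((gget input i j 0, i, j) :: ns') ib b
            = findGo adj (fa+1) ns' (gset ib i j (some false)) b := by
          simp only [findGo, if_pos hee, if_pos h9]
        obtain ⟨ih1, ih2⟩ := ihm (gset ib i j (some false)) b size K (fb+1)
          (by omega) (by rw [hmarkF]; omega) (by rw [dims_gset]; exact hdims)
        rw [hmarkF] at ih1 ih2
        constructor
        · rw [hA]
          have hB : runB input (input.length : Int) (W : Int) (fb+1) (absS W ib) size (((i, j) :: ms') :: K)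
              = runB input (input.length : Int) (W : Int) (fb+1) (gset (absS W ib) i j true) size (ms' :: K) := by
            simp only [runB, hcond, if_true, h9, if_pos]
          rw [hB]
          exact ih1
        · rw [hA]
          omega
      · -- an unvisited basin cell: A recurses, B pushes
        have hnone : noneCnt (gset ib i j (some true)) + 1 = noneCnt ib :=
          noneCnt_gset_none ib i j true hee
        have hA : findGo adj (fa+1) ((gget input i j 0, i, j) :: ns') ib b
            = findGo adj (fa+1) ns'
                (findGo adj fa (gget adj i j []) (gset ib i j (some true)) (b ++ [gget input i j 0])).1
                (findGo adj fa (gget adj i j []) (gset ib i j (some true)) (b ++ [gget input i j 0])).2 := by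
          simp only [findGo, if_pos hee, if_neg h9]
        rw [hadj i j (by omega) (by omega) (by omega) (by omega)] at hA
        set ib1 := gset ib i j (some true) with hib1
        set F1 := findGo adj fa (entA input W i j) ib1 (b ++ [gget input i j 0]) with hF1
        set F2 := findGo adj (fa+1) ns' F1.1 F1.2 with hF2
        have hdims1 : dims ib1 = dims input := by rw [hib1, dims_gset]; exact hdims
        -- outer IH on the pushed frame
        obtain ⟨e1, he1⟩ := (findGo_props adj fa (entA input W i j) ib1 (b ++ [gget input i j 0])).1
        have hlen1 : F1.2.length = b.length + 1 + e1.length := by rw [← hF1] at he1; rw [he1]; simp; omega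
        obtain ⟨E1, U1⟩ := IH fa (by omega) (entA input W i j)
          [(i-1, j), (i+1, j), (i, j-1), (i, j+1)]
          (rns_frame input W i j (by omega) (by omega) (by omega) (by omega))
          ib1 (b ++ [gget input i j 0]) (size + 1) (ms' :: K) fb
          (by omega) (by rw [hmark]; omega) hdims1
        rw [← hF1] at E1 U1
        rw [hmark] at E1 U1
        set d1 := F1.2.length - (b ++ [gget input i j 0]).length with hd1
        -- inner IH on the remaining entries
        have hprops1 := findGo_props adj fa (entA input W i j) ib1 (b ++ [gget input i j 0])
        rw [← hF1] at hprops1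
        obtain ⟨e2, he2⟩ := (findGo_props adj (fa+1) ns' F1.1 F1.2).1
        rw [← hF2] at he2
        have hlen2 : F2.2.length = b.length + 1 + e1.length + e2.length := by
          rw [he2]; simp [hlen1]
        obtain ⟨E2, U2⟩ := ihm F1.1 F1.2 (size + 1 + (d1 : Int)) K (fb - d1)
          (by have := hprops1.2.1; omega)
          (by
            have hux := U1
            have hu1 : (b ++ [gget input i j 0]).length = b.length + 1 := by simp
            omega)
          (by rw [hprops1.2.2]; exact hdims1)
        rw [← hF2] at E2 U2
        have hu1 : (b ++ [gget input i j 0]).length = b.length + 1 := by simp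
        constructor
        · rw [hA]
          have hB : runB input (input.length : Int) (W : Int) (fb+1) (absS W ib) size (((i, j) :: ms') :: K)
              = runB input (input.length : Int) (W : Int) fb (gset (absS W ib) i j true) (size + 1)
                  ([(i-1, j), (i+1, j), (i, j-1), (i, j+1)] :: ms' :: K) := by
            simp only [runB, hcond, if_true, if_neg h9]
          rw [hB, E1, E2]
          have hfuel : fb - d1 - (F2.2.length - F1.2.length) = (fb+1) - (F2.2.length - b.length) := by
            omega
          have hsz : size + 1 + (d1 : Int) + ((F2.2.length - F1.2.length : Nat) : Int)
              = size + ((F2.2.length - b.length : Nat) : Int) := by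
            have : (F2.2.length - b.length : Nat) = 1 + d1 + (F2.2.length - F1.2.length) := by omega
            rw [this]
            push_cast
            ring
          rw [hfuel, hsz]
        · rw [hA]
          omega
    · -- already-visited cell: both skip it
      have hbval : gget (absS W ib) i j false = true := by
        rw [gget_absS W ib i j (by omega) (by omega) (by omega) hrowW]
        cases hg : gget ib i j (some false) with
        | none => exact absurd hg hee
        | some c => rfl
      have hcond : (inb (input.length : Int) (W : Int) i j && !(gget (absS W ib) i j false)) = false := by
        rw [hbval]; simp
      have hA : findGo adj (fa+1) ((gget input i j 0, i, j) :: ns') ib b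
          = findGo adj (fa+1) ns' ib b := by
        simp only [findGo, if_neg hee]
      obtain ⟨ih1, ih2⟩ := ihm ib b size K (fb+1) (by omega) hfb hdims
      refine ⟨?_, by rw [hA]; exact ih2⟩
      rw [hA]
      have hB : runB input (input.length : Int) (W : Int) (fb+1) (absS W ib) size (((i, j) :: ms') :: K)
          = runB input (input.length : Int) (W : Int) (fb+1) (absS W ib) size (ms' :: K) := by
        simp only [runB, hcond]
        simp
      rw [hB]
      exact ih1

-- A's stored neighbour list is B's inline bounds-checked one
theorem entA_eq_filter (input : List (List Int)) (W : Nat) (x y : Int)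
    (hx0 : 0 ≤ x) (hxh : x < (input.length : Int)) (hy0 : 0 ≤ y) (hyw : y < (W : Int)) :
    entA input W x y
      = ([(x-1, y), (x+1, y), (x, y-1), (x, y+1)].filter
          (fun p => inb (input.length : Int) (W : Int) p.1 p.2)).map
          (fun p => (gget input p.1 p.2 0, p.1, p.2)) := by
  have f1 : x - 1 < (input.length : Int) := by omega
  have f2 : (0:Int) ≤ x + 1 := by omega
  have f3 : y - 1 < (W : Int) := by omega
  have f4 : (0:Int) ≤ y + 1 := by omega
  by_cases c1 : (1:Int) ≤ x <;> by_cases c2 : x + 1 < (input.length : Int) <;>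
    by_cases c3 : (1:Int) ≤ y <;> by_cases c4 : y + 1 < (W : Int) <;>
    simp [entA, inb, List.filter_cons, c1, c2, c3, c4, f1, f2, f3, f4, hx0, hxh, hy0, hyw]

-- the low-point test: A counts strictly-greater neighbours, B tests them all
theorem risk_iff (input : List (List Int)) (W : Nat) (x y : Int)
    (hx0 : 0 ≤ x) (hxh : x < (input.length : Int)) (hy0 : 0 ≤ y) (hyw : y < (W : Int)) :
    (((entA input W x y).filter
        (fun n => decide (n.1 > gget input x y 0))).length = (entA input W x y).length)
      ↔ (([(x-1, y), (x+1, y), (x, y-1), (x, y+1)].filter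
          (fun p => inb (input.length : Int) (W : Int) p.1 p.2)).all
          (fun p => decide (gget input p.1 p.2 0 > gget input x y 0)) = true) := by
  rw [entA_eq_filter input W x y hx0 hxh hy0 hyw, List.length_filter_eq_length_iff,
    List.all_eq_true]
  constructor
  · intro h p hp
    exact h _ (List.mem_map_of_mem hp)
  · rintro h a ha
    obtain ⟨p, hp, rfl⟩ := List.mem_map.mp ha
    exact h p hp

-- relation between the two loop states
def RelSt (input : List (List Int)) (W : Nat)
    (stA : Int × List (List Int) × List (List (Option Bool)))
    (stB : Int × List Int × List (List Bool)) : Prop :=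
  stB.1 = stA.1 ∧ stB.2.1 = stA.2.1.map (fun b => (b.length : Int)) ∧
  stB.2.2 = absS W stA.2.2 ∧ dims stA.2.2 = dims input

theorem cell_step (input : List (List Int)) (adj : List (List (List (Int × Int × Int)))) (W : Nat)
    (hPre : ∀ p, p < input.length → W ≤ (input.getD p []).length)
    (hadj : ∀ i j : Int, 0 ≤ i → i < (input.length : Int) → 0 ≤ j → j < (W : Int) →
      gget adj i j [] = entA input W i j)
    (stA : Int × List (List Int) × List (List (Option Bool)))
    (stB : Int × List Int × List (List Bool)) (x y : Int)
    (hx0 : 0 ≤ x) (hxh : x < (input.length : Int)) (hy0 : 0 ≤ y) (hyw : y < (W : Int))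
    (hR : RelSt input W stA stB) :
    RelSt input W (lavaCellA input adj stA x y)
      (lavaCellB input (input.length : Int) (W : Int) stB x y) := by
  obtain ⟨ra, ba, ib⟩ := stA
  obtain ⟨rb, sb, seen⟩ := stB
  obtain ⟨h1, h2, h3, hdims⟩ := hR
  simp only at h1 h2 h3 hdims
  have hlen : ib.length = input.length := length_of_dims ib input hdims
  have hrowW : W ≤ (ib.getD x.toNat []).length := by
    rw [rowlen_of_dims ib input hdims]
    exact hPre x.toNat (by omega)
  simp only [lavaCellA, lavaCellB]
  rw [h1, h2, h3]
  rw [hadj x y hx0 hxh hy0 hyw]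
  set v := gget input x y 0 with hv
  have hrisk : (if (([(x-1, y), (x+1, y), (x, y-1), (x, y+1)].filter
          (fun p => inb (input.length : Int) (W : Int) p.1 p.2)).all
          (fun p => decide (gget input p.1 p.2 0 > v)) = true)
        then ra + (1 + v) else ra)
      = (if (((entA input W x y).filter (fun n => decide (n.1 > v))).length
            = (entA input W x y).length)
        then ra + (1 + v) else ra) := by
    by_cases hc : (((entA input W x y).filter (fun n => decide (n.1 > v))).length
        = (entA input W x y).length)
    · rw [if_pos hc, if_pos ((risk_iff input W x y hx0 hxh hy0 hyw).mp hc)]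
    · rw [if_neg hc, if_neg (fun hb => hc ((risk_iff input W x y hx0 hxh hy0 hyw).mpr hb))]
  by_cases hee : gget ib x y (some false) = none
  · have hbval : gget (absS W ib) x y false = false := by
      rw [gget_absS W ib x y hx0 hy0 (by omega) hrowW, hee]
      rfl
    have hBc : ¬(gget (absS W ib) x y false = true) := by rw [hbval]; simp
    rw [if_pos hee, if_neg hBc]
    by_cases h9 : v = 9
    · simp only [if_pos h9]
      refine ⟨hrisk, rfl, ?_, by rw [dims_gset]; exact hdims⟩
      simp only
      rw [gset_absS W ib x y false hx0 hy0 (by omega)]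
    · simp only [if_neg h9]
      have hmark : absS W (gset ib x y (some true)) = gset (absS W ib) x y true :=
        gset_absS W ib x y true hx0 hy0 (by omega)
      rw [← hmark, find_basin, hadj x y hx0 hxh hy0 hyw]
      set ib1 := gset ib x y (some true) with hib1
      have hdims1 : dims ib1 = dims input := by rw [hib1, dims_gset]; exact hdims
      have hprops := findGo_props adj (noneCnt ib1 + 1) (entA input W x y) ib1 [v]
      obtain ⟨E, U⟩ := simL input adj W hPre hadj (noneCnt ib1 + 1) (entA input W x y)
        [(x-1, y), (x+1, y), (x, y-1), (x, y+1)]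
        (rns_frame input W x y hx0 hxh hy0 hyw)
        ib1 [v] 1 [] (unseenCnt (absS W ib1) + 1)
        (by omega) (by omega) hdims1
      set F := findGo adj (noneCnt ib1 + 1) (entA input W x y) ib1 [v] with hF
      obtain ⟨e, he⟩ := hprops.1
      have hlenF : F.2.length = 1 + e.length := by rw [he]; simp; omega
      have hrunB : runB input (input.length : Int) (W : Int)
          (unseenCnt (absS W ib1) + 1 - (F.2.length - [v].length)) (absS W F.1)
          (1 + ((F.2.length - [v].length : Nat) : Int)) []
          = (absS W F.1, 1 + ((F.2.length - [v].length : Nat) : Int)) := by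
        simp only [runB]
      rw [E, hrunB]
      refine ⟨hrisk, ?_, rfl, by rw [hprops.2.2]; exact hdims1⟩
      simp only [List.map_append, List.map_cons, List.map_nil]
      congr 2
      simp only [List.length_cons, List.length_nil]
      push_cast
      omega
  · have hbval : gget (absS W ib) x y false = true := by
      rw [gget_absS W ib x y hx0 hy0 (by omega) hrowW]
      cases hg : gget ib x y (some false) with
      | none => exact absurd hg hee
      | some c => rfl
    rw [if_neg hee, if_pos hbval]
    exact ⟨hrisk, rfl, rfl, hdims⟩

-- the double scan preserves the state relation
theorem row_rel (input : List (List Int)) (adj : List (List (List (Int × Int × Int)))) (W : Nat)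
    (hPre : ∀ p, p < input.length → W ≤ (input.getD p []).length)
    (hadj : ∀ i j : Int, 0 ≤ i → i < (input.length : Int) → 0 ≤ j → j < (W : Int) →
      gget adj i j [] = entA input W i j)
    (x : Int) (hx0 : 0 ≤ x) (hxh : x < (input.length : Int)) :
    ∀ (ys : List Int), (∀ y ∈ ys, 0 ≤ y ∧ y < (W : Int)) →
    ∀ stA stB, RelSt input W stA stB →
    RelSt input W (ys.foldl (fun st y => lavaCellA input adj st x y) stA)
      (ys.foldl (fun st y => lavaCellB input (input.length : Int) (W : Int) st x y) stB) := by
  intro ys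
  induction ys with
  | nil => intro _ stA stB h; exact h
  | cons y ys ih =>
    intro hb stA stB h
    have hy := hb y (by simp)
    exact ih (fun q hq => hb q (by simp [hq]))
      _ _ (cell_step input adj W hPre hadj stA stB x y hx0 hxh hy.1 hy.2 h)

theorem grid_rel (input : List (List Int)) (adj : List (List (List (Int × Int × Int)))) (W : Nat)
    (hPre : ∀ p, p < input.length → W ≤ (input.getD p []).length)
    (hadj : ∀ i j : Int, 0 ≤ i → i < (input.length : Int) → 0 ≤ j → j < (W : Int) →
      gget adj i j [] = entA input W i j) :
    ∀ (xs : List Int), (∀ x ∈ xs, 0 ≤ x ∧ x < (input.length : Int)) →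
    ∀ stA stB, RelSt input W stA stB →
    RelSt input W
      (xs.foldl (fun st x => (PySem.List.pyRange 0 (W : Int) 1).foldl
        (fun st y => lavaCellA input adj st x y) st) stA)
      (xs.foldl (fun st x => (PySem.List.pyRange 0 (W : Int) 1).foldl
        (fun st y => lavaCellB input (input.length : Int) (W : Int) st x y) st) stB) := by
  intro xs
  induction xs with
  | nil => intro _ stA stB h; exact h
  | cons x xs ih =>
    intro hb stA stB h
    have hx := hb x (by simp)
    exact ih (fun q hq => hb q (by simp [hq])) _ _
      (row_rel input adj W hPre hadj x hx.1 hx.2 (PySem.List.pyRange 0 (W : Int) 1)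
        (fun q hq => by have := PySem.List.mem_pyRange_one.mp hq; omega) stA stB h)

-- the initial states are related
theorem init_rel (input : List (List Int)) (W : Nat) (hW : W = (input.headD []).length)
    (hPre : ∀ r ∈ input, W ≤ r.length) :
    RelSt input W ((0 : Int), ([] : List (List Int)),
        input.map (fun line => line.map (fun _ => (none : Option Bool))))
      ((0 : Int), ([] : List Int),
        input.map (fun _ => List.replicate ((W : Int)).toNat false)) := by
  refine ⟨rfl, rfl, ?_, by simp [dims, List.map_map, Function.comp_def]⟩
  simp only [Int.toNat_natCast, absS, List.map_map]
  apply List.map_congr_left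
  intro line hline
  simp only [Function.comp_def]
  have hlen : W ≤ line.length := hPre line hline
  symm
  apply List.eq_replicate_iff.mpr
  constructor
  · simp; omega
  · intro b hb
    simp only [List.mem_map] at hb
    obtain ⟨o, ho, rfl⟩ := hb
    have : o ∈ (line.map (fun _ => (none : Option Bool))) := List.mem_of_mem_take ho
    simp only [List.mem_map] at this
    obtain ⟨_, _, rfl⟩ := this
    rfl

theorem calculate_lava_tubes_spec : Claim_equal_calculate_lava_tubes := by
  intro input hDom hPre
  obtain ⟨hne, hrows⟩ := hPre
  unfold Spec_calculate_lava_tubes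
  set W := (input.headD []).length with hW
  have hPre' : ∀ p, p < input.length → W ≤ (input.getD p []).length := by
    intro p hp
    rw [List.getD_eq_getElem?_getD, List.getElem?_eq_getElem hp]
    exact hrows _ (List.getElem_mem hp)
  have hadj := tbl input W hW hPre'
  have hadj' : ∀ i j : Int, 0 ≤ i → i < (input.length : Int) → 0 ≤ j → j < (W : Int) →
      gget (find_adjacents input) i j [] = entA input W i j := by
    intro i j h1 h2 h3 h4
    exact hadj i j h1 h2 h3 h4
  unfold calculate_lava_tubes calculate_lava_tubes_alt
  simp only []
  have hrel := grid_rel input (find_adjacents input) W hPre' hadj'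
    (PySem.List.pyRange 0 (input.length : Int) 1)
    (fun q hq => by have := PySem.List.mem_pyRange_one.mp hq; omega)
    ((0 : Int), ([] : List (List Int)),
      input.map (fun line => line.map (fun _ => (none : Option Bool))))
    ((0 : Int), ([] : List Int),
      input.map (fun _ => List.replicate ((W : Int)).toNat false))
    (init_rel input W hW hrows)
  obtain ⟨e1, e2, _, _⟩ := hrel
  rw [← hW]
  rw [e1, e2]
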